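-- pv_equiv track=rewrite | github.com/PiPhi-io/piphi-nework-registry | scripts/generate_registry_entry.py | infer_risk_level
-- ===== SOURCE A (Python) =====
-- def infer_risk_level(deployment_mode: str, runtime_requirements: list[str]) -> str:
--     if any(
--         token in {"privileged_container", "host_networking", "host_filesystem_mounts"}
--         for token in runtime_requirements
--     ):
--         return "high"
--     if deployment_mode == "sidecar" or any(
--         token in {"usb_or_device_access", "direct_hardware_access", "secrets_or_api_tokens", "sidecar_runtime"}
--         for token in runtime_requirements
--     ):
--         return "moderate"
--     return "low"
-- ===== SOURCE B (Python) =====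
-- _RANK = {
--     "privileged_container": 2,
--     "host_networking": 2,
--     "host_filesystem_mounts": 2,
--     "usb_or_device_access": 1,
--     "direct_hardware_access": 1,
--     "secrets_or_api_tokens": 1,
--     "sidecar_runtime": 1,
-- }
--
-- _LABELS = ["low", "moderate", "high"]
--
--
-- def infer_risk_level(deployment_mode: str, runtime_requirements: list[str]) -> str:
--     sev = 1 if deployment_mode == "sidecar" else 0
--     for token in runtime_requirements:
--         sev = max(sev, _RANK.get(token, 0))
--     return _LABELS[sev]
-- ===== Notes on version B (the rewrite author's own statement) =====
-- stated objective: simpler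
-- what changed: Replaced the two any()-with-early-return membership scans by a severity-rank dictionary and a single pass keeping the maximum rank, mapped back to a label at the end.
import Mathlib
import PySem

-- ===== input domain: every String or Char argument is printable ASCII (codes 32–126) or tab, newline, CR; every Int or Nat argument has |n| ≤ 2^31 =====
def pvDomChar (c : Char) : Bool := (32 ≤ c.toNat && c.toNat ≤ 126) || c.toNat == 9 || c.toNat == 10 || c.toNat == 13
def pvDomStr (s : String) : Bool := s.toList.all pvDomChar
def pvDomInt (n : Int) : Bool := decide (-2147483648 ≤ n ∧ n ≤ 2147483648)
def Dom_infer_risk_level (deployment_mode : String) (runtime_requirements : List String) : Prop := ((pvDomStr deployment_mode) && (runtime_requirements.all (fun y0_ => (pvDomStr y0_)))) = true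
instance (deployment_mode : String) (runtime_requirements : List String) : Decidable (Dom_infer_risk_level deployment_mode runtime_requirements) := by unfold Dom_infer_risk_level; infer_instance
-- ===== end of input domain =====

-- B replaces A's two any()-membership scans by one pass over a token→severity-rank dict keeping the maximum rank, mapped to a label at the end (simpler decomposition, same O(n) cost).


-- ===== PORT A =====
def infer_risk_level (deployment_mode : String) (runtime_requirements : List String) : String :=
  if runtime_requirements.any (fun token =>
      token == "privileged_container" || token == "host_networking" || token == "host_filesystem_mounts") then
    "high"
  else if deployment_mode == "sidecar" || runtime_requirements.any (fun token =>
      token == "usb_or_device_access" || token == "direct_hardware_access" ||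
      token == "secrets_or_api_tokens" || token == "sidecar_runtime") then
    "moderate"
  else
    "low"

-- ===== PORT B =====
def pvRankDict : PySem.Dict String Int :=
  PySem.Dict.ofList
    [("privileged_container", 2), ("host_networking", 2), ("host_filesystem_mounts", 2),
     ("usb_or_device_access", 1), ("direct_hardware_access", 1), ("secrets_or_api_tokens", 1),
     ("sidecar_runtime", 1)]

def pvLabels : List String := ["low", "moderate", "high"]

def infer_risk_level_alt (deployment_mode : String) (runtime_requirements : List String) : String :=
  let sev0 : Int := if deployment_mode == "sidecar" then 1 else 0
  let sev : Int := runtime_requirements.foldl (fun s t => max s (PySem.Dict.getD pvRankDict t 0)) sev0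
  (PySem.List.pyGet? pvLabels sev).getD ""  -- sev ∈ {0,1,2}, so the lookup never misses

-- ===== PRECONDITION & SPEC =====
def Spec_infer_risk_level (deployment_mode : String) (runtime_requirements : List String) (out : String) : Prop := out = infer_risk_level_alt deployment_mode runtime_requirements
instance (deployment_mode : String) (runtime_requirements : List String) (out : String) : Decidable (Spec_infer_risk_level deployment_mode runtime_requirements out) := by unfold Spec_infer_risk_level; infer_instance

-- ===== CLAIM (what is proved, stated in full; the proofs are below) =====
def Claim_equal_infer_risk_level : Prop := ∀ (deployment_mode : String) (runtime_requirements : List String), Dom_infer_risk_level deployment_mode runtime_requirements → Spec_infer_risk_level deployment_mode runtime_requirements (infer_risk_level deployment_mode runtime_requirements)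

-- ===== LEMMAS AND PROOFS =====

def pvIsHigh (t : String) : Bool :=
  t == "privileged_container" || t == "host_networking" || t == "host_filesystem_mounts"

def pvIsMod (t : String) : Bool :=
  t == "usb_or_device_access" || t == "direct_hardware_access" ||
  t == "secrets_or_api_tokens" || t == "sidecar_runtime"

theorem pvRankDict_mk :
    pvRankDict = PySem.Dict.mk
      [("privileged_container", 2), ("host_networking", 2), ("host_filesystem_mounts", 2),
       ("usb_or_device_access", 1), ("direct_hardware_access", 1), ("secrets_or_api_tokens", 1),
       ("sidecar_runtime", 1)] := by decide

theorem pvRank_eq (t : String) :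
    PySem.Dict.getD pvRankDict t 0 = (if pvIsHigh t then 2 else if pvIsMod t then 1 else 0) := by
  rw [pvRankDict_mk]
  simp only [pvIsHigh, pvIsMod, PySem.Dict.getD, PySem.Dict.get?_mk_cons]
  by_cases h1 : t = "privileged_container" <;>
  by_cases h2 : t = "host_networking" <;>
  by_cases h3 : t = "host_filesystem_mounts" <;>
  by_cases h4 : t = "usb_or_device_access" <;>
  by_cases h5 : t = "direct_hardware_access" <;>
  by_cases h6 : t = "secrets_or_api_tokens" <;>
  by_cases h7 : t = "sidecar_runtime" <;>
  simp_all [PySem.Dict.get?] <;> split_ifs <;> simp_all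

theorem pvFold_eq (rr : List String) (sev : Int) (hsev : 0 ≤ sev) :
    rr.foldl (fun s t => max s (PySem.Dict.getD pvRankDict t 0)) sev =
      max sev (if rr.any pvIsHigh then 2 else if rr.any pvIsMod then 1 else 0) := by
  induction rr generalizing sev with
  | nil => simp [hsev]
  | cons t rs ih =>
    rw [List.foldl_cons, ih _ (le_trans hsev (le_max_left _ _)),
      List.any_cons, List.any_cons, pvRank_eq]
    by_cases h1 : pvIsHigh t <;> by_cases h2 : pvIsMod t <;>
      by_cases h3 : rs.any pvIsHigh <;> by_cases h4 : rs.any pvIsMod <;>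
      simp [h1, h2, h3, h4] <;> omega

theorem infer_risk_level_spec : Claim_equal_infer_risk_level := by
  intro dm rr _
  show infer_risk_level dm rr = infer_risk_level_alt dm rr
  have h0 : (0 : Int) ≤ (if dm == "sidecar" then (1 : Int) else 0) := by split <;> norm_num
  show (if rr.any pvIsHigh then "high"
      else if dm == "sidecar" || rr.any pvIsMod then "moderate" else "low") =
    (PySem.List.pyGet? pvLabels
      (rr.foldl (fun s t => max s (PySem.Dict.getD pvRankDict t 0))
        (if dm == "sidecar" then (1 : Int) else 0))).getD ""
  rw [pvFold_eq _ _ h0]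
  cases h1 : rr.any pvIsHigh <;> cases hs : dm == "sidecar" <;> cases h2 : rr.any pvIsMod <;>
    simp [pvLabels, PySem.List.pyGet?, PySem.List.pyIdx?]
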